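-- pv_equiv track=rewrite | github.com/adpena/silicon_refinery | use_cases/07_stress_test_throughput/example.py | generate_gigantic_dataset
-- ===== SOURCE A (Python) =====
-- def generate_gigantic_dataset(rows: int):
--     """Generate a massive stream of unstructured text."""
--     templates = [
--         "The recent quarterly earnings showed a 20% increase in revenue. Please review the attached spreadsheet immediately.",
--         "Server CPU utilization has spiked to 99% in the us-east region. All services are currently degraded.",
--         "Patient XYZ requires a follow-up appointment next week for their routine blood work.",
--         "Just wanted to say hello and see if you wanted to grab lunch today.",
--     ]
--     for i in range(rows):
--         yield templates[i % len(templates)]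
-- ===== SOURCE B (Python) =====
-- def generate_gigantic_dataset(rows: int):
--     """Generate a massive stream of unstructured text."""
--     templates = [
--         "The recent quarterly earnings showed a 20% increase in revenue. Please review the attached spreadsheet immediately.",
--         "Server CPU utilization has spiked to 99% in the us-east region. All services are currently degraded.",
--         "Patient XYZ requires a follow-up appointment next week for their routine blood work.",
--         "Just wanted to say hello and see if you wanted to grab lunch today.",
--     ]
--     if rows <= 0:
--         return
--     full, rem = divmod(rows, len(templates))
--     for _ in range(full):
--         yield from templates
--     yield from templates[:rem]
-- ===== Notes on version B (the rewrite author's own statement) =====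
-- stated objective: alternative
-- what changed: Replaces the per-row modulo indexing loop with a divmod decomposition: yield the whole template list `full` times, then the first `rem` templates, after a guard for non-positive row counts.
import Mathlib
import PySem

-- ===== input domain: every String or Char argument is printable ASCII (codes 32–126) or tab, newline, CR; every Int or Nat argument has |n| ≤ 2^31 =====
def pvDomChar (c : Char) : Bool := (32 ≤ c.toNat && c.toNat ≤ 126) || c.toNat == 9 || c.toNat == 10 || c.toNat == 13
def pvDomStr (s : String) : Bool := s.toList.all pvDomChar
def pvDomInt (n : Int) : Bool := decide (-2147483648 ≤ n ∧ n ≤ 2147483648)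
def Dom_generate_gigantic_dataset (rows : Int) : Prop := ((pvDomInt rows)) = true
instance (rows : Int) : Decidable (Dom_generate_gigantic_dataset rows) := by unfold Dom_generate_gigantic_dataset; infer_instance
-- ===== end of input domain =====

-- B yields the template block `divmod(rows, 4)` times plus a prefix instead of indexing by i % 4; same output list.

-- ===== PORT A =====
def pyTemplatesA : List String :=
  [ "The recent quarterly earnings showed a 20% increase in revenue. Please review the attached spreadsheet immediately.",
    "Server CPU utilization has spiked to 99% in the us-east region. All services are currently degraded.",
    "Patient XYZ requires a follow-up appointment next week for their routine blood work.",
    "Just wanted to say hello and see if you wanted to grab lunch today." ]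

-- templates[i % len(templates)]: the index is always in range, so pyGetD with a default is exact here.
def generate_gigantic_dataset (rows : Int) : List String :=
  (PySem.List.pyRange 0 rows 1).map
    (fun i => PySem.List.pyGetD pyTemplatesA (PySem.Int.mod i (pyTemplatesA.length : Int)) "")

-- ===== PORT B =====
def pyTemplatesB : List String :=
  [ "The recent quarterly earnings showed a 20% increase in revenue. Please review the attached spreadsheet immediately.",
    "Server CPU utilization has spiked to 99% in the us-east region. All services are currently degraded.",
    "Patient XYZ requires a follow-up appointment next week for their routine blood work.",
    "Just wanted to say hello and see if you wanted to grab lunch today." ]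

def generate_gigantic_dataset_alt (rows : Int) : List String :=
  if rows ≤ 0 then []
  else
    let full := PySem.Int.floordiv rows (pyTemplatesB.length : Int)
    let rem := PySem.Int.mod rows (pyTemplatesB.length : Int)
    (List.replicate full.toNat pyTemplatesB).flatten
      ++ PySem.List.slice pyTemplatesB none (some rem)

-- ===== PRECONDITION & SPEC =====
def Spec_generate_gigantic_dataset (rows : Int) (out : List String) : Prop := out = generate_gigantic_dataset_alt rows
instance (rows : Int) (out : List String) : Decidable (Spec_generate_gigantic_dataset rows out) := by unfold Spec_generate_gigantic_dataset; infer_instance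

-- ===== CLAIM (what is proved, stated in full; the proofs are below) =====
def Claim_equal_generate_gigantic_dataset : Prop := ∀ (rows : Int), Dom_generate_gigantic_dataset rows → Spec_generate_gigantic_dataset rows (generate_gigantic_dataset rows)

-- ===== LEMMAS AND PROOFS =====

-- the value A yields at (nonnegative) index k
def pvElem (k : Nat) : String := pyTemplatesA.getD (k % 4) ""

theorem pvRange_map_elem (q r : Nat) (hr : r ≤ 4) :
    (List.range (4 * q + r)).map pvElem
      = (List.replicate q pyTemplatesA).flatten ++ pyTemplatesA.take r := by
  induction q with
  | zero =>
      simp only [Nat.mul_zero, Nat.zero_add, List.replicate_zero, List.flatten_nil, List.nil_append]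
      interval_cases r <;> rfl
  | succ q ih =>
      have h1 : 4 * (q + 1) + r = 4 + (4 * q + r) := by omega
      rw [h1, List.range_add, List.map_append, List.map_map]
      have h2 : (List.range (4 * q + r)).map (pvElem ∘ (4 + ·)) = (List.range (4 * q + r)).map pvElem := by
        apply List.map_congr_left
        intro k _
        simp [pvElem, Nat.add_mod_left]
      rw [h2, ih]
      simp [List.replicate_succ, List.flatten_cons]
      rfl

theorem pvLenA : (pyTemplatesA.length : Int) = 4 := rfl

theorem pvTemplatesAB : pyTemplatesB = pyTemplatesA := rfl

-- ===== VERDICT (by name: the statement is the Claim_ definition above) =====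
theorem generate_gigantic_dataset_spec : Claim_equal_generate_gigantic_dataset := by
  intro rows _
  unfold Spec_generate_gigantic_dataset generate_gigantic_dataset generate_gigantic_dataset_alt
  by_cases h : rows ≤ 0
  · rw [PySem.List.pyRange_one_eq_nil h]
    simp [h]
  · simp only [if_neg h]
    push Not at h
    obtain ⟨n, rfl⟩ : ∃ n : Nat, rows = (n : Int) := ⟨rows.toNat, (Int.toNat_of_nonneg h.le).symm⟩
    rw [pvTemplatesAB, pvLenA]
    have hfull : PySem.Int.floordiv (n : Int) 4 = ((n / 4 : Nat) : Int) := by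
      exact_mod_cast PySem.Int.floordiv_natCast n 4
    have hrem : PySem.Int.mod (n : Int) 4 = ((n % 4 : Nat) : Int) := by
      exact_mod_cast PySem.Int.mod_natCast n 4
    rw [hfull, hrem, PySem.List.slice_to_natCast]
    have hA : PySem.List.pyRange 0 (n : Int) 1 = (List.range n).map (fun k => ((k : Nat) : Int)) := by
      rw [PySem.List.pyRange_one]
      simp
    rw [hA, List.map_map]
    have hmap : (List.range n).map
        ((fun i => PySem.List.pyGetD pyTemplatesA (PySem.Int.mod i 4) "")
          ∘ (fun k : Nat => ((k : Nat) : Int)))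
        = (List.range n).map pvElem := by
      apply List.map_congr_left
      intro k _
      simp only [Function.comp_apply]
      have : PySem.Int.mod ((k : Nat) : Int) 4 = ((k % 4 : Nat) : Int) := by
        exact_mod_cast PySem.Int.mod_natCast k 4
      rw [this, PySem.List.pyGetD_natCast]
      rfl
    rw [hmap]
    have hn : n = 4 * (n / 4) + n % 4 := (Nat.div_add_mod' n 4).symm ▸ by omega
    calc (List.range n).map pvElem
        = (List.range (4 * (n / 4) + n % 4)).map pvElem := by rw [← hn]
      _ = (List.replicate (n / 4) pyTemplatesA).flatten ++ pyTemplatesA.take (n % 4) := by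
          exact pvRange_map_elem (n / 4) (n % 4) (by omega)
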